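-- pv_equiv track=rewrite | github.com/sk-mcc/apps | faculty-tools/pdf-to-html.py | normalize_heading_hierarchy
-- ===== SOURCE A (Python) =====
-- def normalize_heading_hierarchy(elements):
--     """Ensure heading levels don't skip - must go H1->H2->H3, never H1->H3
--
--     When a skip is detected, shift ALL remaining headings by the skip amount,
--     preserving their relative structure.
--     """
--     if not elements:
--         return elements
--
--     # Get all headings with their indices
--     headings = []
--     for i, elem in enumerate(elements):
--         tag = elem.get('user_tag', '')
--         if tag and tag.startswith('H') and tag[1:].isdigit():
--             headings.append((i, int(tag[1:])))
--
--     if not headings: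
--         return elements
--
--     # Find where skip occurs and calculate total shift needed
--     shift_amount = 0
--     prev_level = 0
--
--     for idx, (elem_idx, level) in enumerate(headings):
--         # Apply current shift
--         adjusted_level = level - shift_amount
--
--         # Check if this creates a skip
--         if prev_level > 0 and adjusted_level > prev_level + 1:
--             # Skip detected! Calculate additional shift needed
--             additional_shift = adjusted_level - (prev_level + 1)
--             shift_amount += additional_shift
--             adjusted_level = prev_level + 1
--
--         # Update for next iteration
--         prev_level = adjusted_level
--         headings[idx] = (elem_idx, adjusted_level)
--
--     # Apply the adjusted levels back to elements (cap at H2 minimum for non-first headings)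
--     first_heading = True
--     for elem_idx, new_level in headings:
--         # Don't let non-first headings become H1
--         if not first_heading and new_level < 2:
--             new_level = 2
--         elements[elem_idx]['user_tag'] = f'H{new_level}'
--         elements[elem_idx]['suggested_tag'] = f'H{new_level}'
--         first_heading = False
--
--     return elements
-- ===== SOURCE B (Python) =====
-- def normalize_heading_hierarchy(elements):
--     """Single fused pass: adjust, clamp and rewrite each heading as it is met
--     (mutates `elements` in place, like the original)."""
--     if not elements:
--         return elements
--
--     shift = 0
--     prev = 0
--     first = True
--     for elem in elements:
--         tag = elem.get('user_tag', '')
--         if len(tag) >= 2 and tag[0] == 'H' and tag[1:].isdigit():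
--             adjusted = int(tag[1:]) - shift
--             if prev > 0 and adjusted > prev + 1:
--                 shift += adjusted - (prev + 1)
--                 adjusted = prev + 1
--             shown = adjusted if first or adjusted >= 2 else 2
--             elem['user_tag'] = f'H{shown}'
--             elem['suggested_tag'] = f'H{shown}'
--             prev = adjusted
--             first = False
--     return elements
-- ===== Notes on version B (the rewrite author's own statement) =====
-- stated objective: simpler
-- what changed: A makes three passes (collect (index, level) pairs for all headings, rewrite the levels with the shift/skip logic, then write the capped tags back into elements by index); B fuses everything into a single pass over elements that adjusts, caps and rewrites each heading in place as it is met, dropping the intermediate headings list and the index bookkeeping entirely.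
import Mathlib
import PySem

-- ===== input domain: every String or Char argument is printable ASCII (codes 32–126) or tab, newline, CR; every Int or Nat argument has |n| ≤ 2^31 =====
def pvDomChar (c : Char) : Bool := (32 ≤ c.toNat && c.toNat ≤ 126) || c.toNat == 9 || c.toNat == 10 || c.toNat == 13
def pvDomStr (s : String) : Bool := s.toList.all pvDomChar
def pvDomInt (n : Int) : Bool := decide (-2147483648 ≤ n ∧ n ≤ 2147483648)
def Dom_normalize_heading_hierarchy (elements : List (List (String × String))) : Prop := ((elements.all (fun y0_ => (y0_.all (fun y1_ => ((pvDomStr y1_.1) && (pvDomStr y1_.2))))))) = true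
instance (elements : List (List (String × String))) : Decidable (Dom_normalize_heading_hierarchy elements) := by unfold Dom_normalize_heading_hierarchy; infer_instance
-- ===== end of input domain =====

-- B fuses A's three passes (collect headings with indices, adjust levels, write back
-- by index) into one pass over `elements`; equivalence is about the RETURN value
-- (both Pythons also mutate `elements` in place identically).

-- shared idiom of both Pythons: elements[i]['user_tag'] = f'H{l}'; elements[i]['suggested_tag'] = f'H{l}'
def pvWriteTags (e : List (String × String)) (l : Int) : List (String × String) :=
  (((PySem.Dict.mk e).insert "user_tag" ("H" ++ PySem.Int.toStr l)).insert
      "suggested_tag" ("H" ++ PySem.Int.toStr l)).items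

-- ===== PORT A =====
-- pass 1: `for i, elem in enumerate(elements): … headings.append((i, int(tag[1:])))`
-- (int(tag[1:]) is guarded by tag[1:].isdigit(), so ofStr? always succeeds; .getD 0 is never taken)
def pvCollectA : List (List (String × String)) → Nat → List (Nat × Int)
  | [], _ => []
  | e :: es, i =>
    let tag := (PySem.Dict.mk e).getD "user_tag" ""
    if tag ≠ "" ∧ PySem.Str.startswith tag "H" = true ∧
        PySem.Str.strIsdigit (PySem.Str.slice tag (some 1) none) = true then
      (i, (PySem.Int.ofStr? (PySem.Str.slice tag (some 1) none)).getD 0) :: pvCollectA es (i + 1)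
    else pvCollectA es (i + 1)

-- pass 2: the `for idx, (elem_idx, level) in enumerate(headings)` in-place rewrite loop
def pvAdjustA (shift prev : Int) : List (Nat × Int) → List (Nat × Int)
  | [] => []
  | (i, l) :: rest =>
    let a := l - shift
    if prev > 0 ∧ a > prev + 1 then
      (i, prev + 1) :: pvAdjustA (shift + (a - (prev + 1))) (prev + 1) rest
    else
      (i, a) :: pvAdjustA shift a rest

-- elements[i] := pvWriteTags elements[i] l  (i comes from enumerate, so it is always in range)
def pvSetAtA : List (List (String × String)) → Nat → Int → List (List (String × String))
  | [], _, _ => []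
  | e :: es, 0, l => pvWriteTags e l :: es
  | e :: es, n + 1, l => e :: pvSetAtA es n l

-- pass 3: `for elem_idx, new_level in headings:` with the non-first H2 cap
def pvApplyA (els : List (List (String × String))) (first : Bool) :
    List (Nat × Int) → List (List (String × String))
  | [] => els
  | (i, l) :: rest =>
    let l' := if first = false ∧ l < 2 then 2 else l
    pvApplyA (pvSetAtA els i l') false rest

def normalize_heading_hierarchy (elements : List (List (String × String))) :
    List (List (String × String)) :=
  if elements = [] then elements
  else
    let headings := pvCollectA elements 0
    if headings = [] then elements
    else pvApplyA elements true (pvAdjustA 0 0 headings)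

-- ===== PORT B =====
-- `len(tag) >= 2 and tag[0] == 'H' and tag[1:].isdigit()`, returning int(tag[1:])
def pvHeadLevelB (e : List (String × String)) : Option Int :=
  let tag := (PySem.Dict.mk e).getD "user_tag" ""
  if PySem.Str.len tag ≥ 2 ∧ PySem.Str.pyGet? tag 0 = some 'H' ∧
      PySem.Str.strIsdigit (PySem.Str.slice tag (some 1) none) = true then
    some ((PySem.Int.ofStr? (PySem.Str.slice tag (some 1) none)).getD 0)
  else none

-- the single `for elem in elements:` loop of B (state: shift, prev, first)
def pvGoB (shift prev : Int) (first : Bool) : List (List (String × String)) → List (List (String × String))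
  | [] => []
  | e :: es =>
    match pvHeadLevelB e with
    | none => e :: pvGoB shift prev first es
    | some l =>
      let a0 := l - shift
      let sa := if prev > 0 ∧ a0 > prev + 1 then (shift + (a0 - (prev + 1)), prev + 1) else (shift, a0)
      let shown := if first = false ∧ sa.2 < 2 then 2 else sa.2
      pvWriteTags e shown :: pvGoB sa.1 sa.2 false es

def normalize_heading_hierarchy_alt (elements : List (List (String × String))) :
    List (List (String × String)) :=
  if elements = [] then elements
  else pvGoB 0 0 true elements

-- ===== PRECONDITION & SPEC =====
def Spec_normalize_heading_hierarchy (elements : List (List (String × String))) (out : List (List (String × String))) : Prop := out = normalize_heading_hierarchy_alt elements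
instance (elements : List (List (String × String))) (out : List (List (String × String))) : Decidable (Spec_normalize_heading_hierarchy elements out) := by unfold Spec_normalize_heading_hierarchy; infer_instance

-- ===== CLAIM (what is proved, stated in full; the proofs are below) =====
def Claim_equal_normalize_heading_hierarchy : Prop := ∀ (elements : List (List (String × String))), Dom_normalize_heading_hierarchy elements → Spec_normalize_heading_hierarchy elements (normalize_heading_hierarchy elements)

-- ===== LEMMAS AND PROOFS =====

-- B's heading test (len/tag[0]) agrees with A's (truthiness/startswith)
lemma pv_cond_iff (tag : String) :
    (PySem.Str.len tag ≥ 2 ∧ PySem.Str.pyGet? tag 0 = some 'H' ∧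
       PySem.Str.strIsdigit (PySem.Str.slice tag (some 1) none) = true) ↔
    (tag ≠ "" ∧ PySem.Str.startswith tag "H" = true ∧
       PySem.Str.strIsdigit (PySem.Str.slice tag (some 1) none) = true) := by
  have hdig : PySem.Str.strIsdigit (PySem.Str.slice tag (some 1) none) =
      PySem.Chars.strIsdigit tag.toList.tail := by
    simp [PySem.Str.toList_slice, PySem.List.slice_from_one]
  have hlen : PySem.Str.len tag = tag.toList.length := by simp [PySem.Str.len]
  have hget : PySem.Str.pyGet? tag 0 = tag.toList[(0:Nat)]? := by
    simpa using PySem.Str.pyGet?_natCast tag 0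
  have hsw : PySem.Str.startswith tag "H" = true ↔ ['H'] <+: tag.toList := by
    have := PySem.Chars.startswith_iff tag.toList ("H".toList)
    simp only [PySem.Str.startswith_eq] at *
    convert this using 2
  have hne : (tag ≠ "") ↔ tag.toList ≠ [] := not_congr String.toList_eq_nil_iff.symm
  rw [hdig, hlen, hget, hne]
  rcases h : tag.toList with _ | ⟨c, cs⟩
  · simp
  · rw [show (PySem.Str.startswith tag "H" = true ↔ ['H'] <+: c :: cs) from h ▸ hsw]
    rcases cs with _ | ⟨c', cs'⟩
    · simp [show PySem.Chars.strIsdigit ([] : List Char) = false from rfl]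
    · simp only [List.cons_prefix_cons, List.nil_prefix, and_true, List.getElem?_cons_zero,
        Option.some.injEq, List.length_cons, ne_eq, reduceCtorEq, not_false_iff, true_and]
      constructor
      · rintro ⟨h1, h2, h3⟩; exact ⟨h2.symm, h3⟩
      · rintro ⟨h1, h2⟩
        refine ⟨by push_cast; omega, h1.symm, h2⟩

-- hence B's Option-valued test is A's guarded collection step
lemma pvHeadLevelB_eq (e : List (String × String)) :
    pvHeadLevelB e =
      (if ((PySem.Dict.mk e).getD "user_tag" "") ≠ "" ∧
          PySem.Str.startswith ((PySem.Dict.mk e).getD "user_tag" "") "H" = true ∧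
          PySem.Str.strIsdigit (PySem.Str.slice ((PySem.Dict.mk e).getD "user_tag" "") (some 1) none) = true then
        some ((PySem.Int.ofStr? (PySem.Str.slice ((PySem.Dict.mk e).getD "user_tag" "") (some 1) none)).getD 0)
      else none) := by
  unfold pvHeadLevelB
  exact if_congr (pv_cond_iff _) rfl rfl

-- writing at an index produced by enumerate hits exactly that element
lemma pvSetAtA_append (pre : List (List (String × String))) (e : List (String × String))
    (es : List (List (String × String))) (l : Int) :
    pvSetAtA (pre ++ e :: es) pre.length l = pre ++ pvWriteTags e l :: es := by
  induction pre with
  | nil => rfl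
  | cons p ps ih => simp [pvSetAtA, ih]

-- main invariant: A's adjust-then-write passes over the headings of `es`
-- (collected with base index `pre.length`) equal B's single pass over `es`
lemma pv_main (es : List (List (String × String))) :
    ∀ (pre : List (List (String × String))) (shift prev : Int) (first : Bool),
      pvApplyA (pre ++ es) first (pvAdjustA shift prev (pvCollectA es pre.length)) =
        pre ++ pvGoB shift prev first es := by
  induction es with
  | nil => intro pre shift prev first; simp [pvCollectA, pvAdjustA, pvApplyA, pvGoB]
  | cons e es ih =>
    intro pre shift prev first
    by_cases h : ((PySem.Dict.mk e).getD "user_tag" "") ≠ "" ∧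
        PySem.Str.startswith ((PySem.Dict.mk e).getD "user_tag" "") "H" = true ∧
        PySem.Str.strIsdigit (PySem.Str.slice ((PySem.Dict.mk e).getD "user_tag" "") (some 1) none) = true
    · have hb : pvHeadLevelB e =
          some ((PySem.Int.ofStr? (PySem.Str.slice ((PySem.Dict.mk e).getD "user_tag" "") (some 1) none)).getD 0) := by
        rw [pvHeadLevelB_eq, if_pos h]
      set lvl := (PySem.Int.ofStr? (PySem.Str.slice ((PySem.Dict.mk e).getD "user_tag" "") (some 1) none)).getD 0 with hlvl
      rw [show pvCollectA (e :: es) pre.length = (pre.length, lvl) :: pvCollectA es (pre.length + 1) from by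
        simp only [pvCollectA]; rw [if_pos h]]
      simp only [pvGoB, hb]
      by_cases h2 : prev > 0 ∧ lvl - shift > prev + 1
      · simp only [pvAdjustA, if_pos h2, pvApplyA]
        rw [pvSetAtA_append]
        simpa using ih (pre ++ [pvWriteTags e (if first = false ∧ prev + 1 < 2 then 2 else prev + 1)])
          (shift + (lvl - shift - (prev + 1))) (prev + 1) false
      · simp only [pvAdjustA, if_neg h2, pvApplyA]
        rw [pvSetAtA_append]
        simpa using ih (pre ++ [pvWriteTags e (if first = false ∧ lvl - shift < 2 then 2 else lvl - shift)])
          shift (lvl - shift) false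
    · have hb : pvHeadLevelB e = none := by rw [pvHeadLevelB_eq, if_neg h]
      rw [show pvCollectA (e :: es) pre.length = pvCollectA es (pre.length + 1) from by
        simp only [pvCollectA]; rw [if_neg h]]
      simp only [pvGoB, hb]
      simpa using ih (pre ++ [e]) shift prev first

-- if A found no headings, B's pass leaves every element untouched
lemma pvGoB_of_no_headings (es : List (List (String × String))) :
    ∀ (i : Nat) (shift prev : Int) (first : Bool),
      pvCollectA es i = [] → pvGoB shift prev first es = es := by
  induction es with
  | nil => intro _ _ _ _ _; rfl
  | cons e es ih =>
    intro i shift prev first hc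
    by_cases h : ((PySem.Dict.mk e).getD "user_tag" "") ≠ "" ∧
        PySem.Str.startswith ((PySem.Dict.mk e).getD "user_tag" "") "H" = true ∧
        PySem.Str.strIsdigit (PySem.Str.slice ((PySem.Dict.mk e).getD "user_tag" "") (some 1) none) = true
    · exfalso
      simp only [pvCollectA] at hc
      rw [if_pos h] at hc
      exact List.cons_ne_nil _ _ hc
    · have hb : pvHeadLevelB e = none := by rw [pvHeadLevelB_eq, if_neg h]
      simp only [pvCollectA] at hc
      rw [if_neg h] at hc
      simp only [pvGoB, hb]
      rw [ih (i + 1) shift prev first hc]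

-- ===== VERDICT (by name: the statement is the Claim_ definition above) =====
theorem normalize_heading_hierarchy_spec : Claim_equal_normalize_heading_hierarchy := by
  intro elements _
  unfold Spec_normalize_heading_hierarchy normalize_heading_hierarchy normalize_heading_hierarchy_alt
  by_cases he : elements = []
  · simp [he]
  · simp only [if_neg he]
    by_cases hh : pvCollectA elements 0 = []
    · rw [if_pos hh, pvGoB_of_no_headings elements 0 0 0 true hh]
    · rw [if_neg hh]
      simpa using pv_main elements [] 0 0 true
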